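-- pv_equiv track=rewrite | github.com/TangyFeline/DroneBot | utils.py | combine_texts
-- ===== SOURCE A (Python) =====
-- def combine_texts(first_text,second_text):
--   arr1 = first_text.split('\n')
--   arr2 = second_text.split('\n')
--   num_lines = max( len(arr1), len(arr2))
--   return_arr = []
--   for i in range(0,num_lines+1):
--     arr3=[]
--     for index, value in enumerate(arr1):
--       if index < i:
--         arr3.append(arr1[index] if index < len(arr1) else "")
--       else:
--         arr3.append(arr2[index] if index < len(arr2) else "")
--     return_arr.append('\n'.join(arr3))
--
--   return return_arr
-- ===== SOURCE B (Python) =====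
-- def combine_texts(first_text, second_text):
--     arr1 = first_text.split('\n')
--     arr2 = second_text.split('\n')
--     num_lines = max(len(arr1), len(arr2))
--     cur = [arr2[j] if j < len(arr2) else "" for j in range(len(arr1))]
--     out = ['\n'.join(cur)]
--     for i in range(1, num_lines + 1):
--         if i - 1 < len(arr1):
--             cur[i - 1] = arr1[i - 1]
--         out.append('\n'.join(cur))
--     return out
-- ===== Notes on version B (the rewrite author's own statement) =====
-- stated objective: alternative
-- what changed: Instead of rebuilding the whole line list from a per-index conditional on every outer step, B builds the initial all-arr2 list once and then mutates a single cell (cur[i-1] = arr1[i-1]) per step before joining.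
import Mathlib
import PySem

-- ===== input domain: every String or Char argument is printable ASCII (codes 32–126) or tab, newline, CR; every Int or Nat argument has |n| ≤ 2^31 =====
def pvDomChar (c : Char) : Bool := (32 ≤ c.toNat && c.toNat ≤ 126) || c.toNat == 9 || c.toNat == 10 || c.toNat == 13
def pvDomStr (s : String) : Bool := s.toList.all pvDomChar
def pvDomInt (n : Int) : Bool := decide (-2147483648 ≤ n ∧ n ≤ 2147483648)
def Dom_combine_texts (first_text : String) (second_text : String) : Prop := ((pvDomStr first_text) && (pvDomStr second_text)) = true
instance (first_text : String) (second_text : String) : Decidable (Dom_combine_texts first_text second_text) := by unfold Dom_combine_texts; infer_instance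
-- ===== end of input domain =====

-- B replaces A's rebuild-the-whole-line-list-per-step with a single list mutated one cell per step
-- (objective: alternative decomposition; same asymptotic cost of producing the joined outputs).

-- ===== PORT A =====
def combine_texts (first_text : String) (second_text : String) : List String :=
  let arr1 := (PySem.Str.split? first_text "\n").getD []
  let arr2 := (PySem.Str.split? second_text "\n").getD []
  let num_lines : Int := max (arr1.length : Int) (arr2.length : Int)
  (PySem.List.pyRange 0 (num_lines + 1) 1).foldl (fun return_arr i =>
    let arr3 := (PySem.List.enumerate arr1).foldl (fun arr3 p =>
      if p.1 < i then
        arr3 ++ [if p.1 < (arr1.length : Int) then PySem.List.pyGetD arr1 p.1 "" else ""]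
      else
        arr3 ++ [if p.1 < (arr2.length : Int) then PySem.List.pyGetD arr2 p.1 "" else ""]) []
    return_arr ++ [PySem.Str.join "\n" arr3]) []

-- ===== PORT B =====
def combine_texts_alt (first_text : String) (second_text : String) : List String :=
  let arr1 := (PySem.Str.split? first_text "\n").getD []
  let arr2 := (PySem.Str.split? second_text "\n").getD []
  let num_lines : Int := max (arr1.length : Int) (arr2.length : Int)
  let cur := (PySem.List.pyRange 0 (arr1.length : Int) 1).map
    (fun j => if j < (arr2.length : Int) then PySem.List.pyGetD arr2 j "" else "")
  let res := (PySem.List.pyRange 1 (num_lines + 1) 1).foldl (fun st i =>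
    let cur' := if i - 1 < (arr1.length : Int)
      then st.1.set (i - 1).toNat (PySem.List.pyGetD arr1 (i - 1) "")
      else st.1
    (cur', st.2 ++ [PySem.Str.join "\n" cur'])) (cur, [PySem.Str.join "\n" cur])
  res.2

-- ===== PRECONDITION & SPEC =====
def Spec_combine_texts (first_text : String) (second_text : String) (out : List String) : Prop := out = combine_texts_alt first_text second_text
instance (first_text : String) (second_text : String) (out : List String) : Decidable (Spec_combine_texts first_text second_text out) := by unfold Spec_combine_texts; infer_instance

-- ===== CLAIM (what is proved, stated in full; the proofs are below) =====
def Claim_equal_combine_texts : Prop := ∀ (first_text : String) (second_text : String), Dom_combine_texts first_text second_text → Spec_combine_texts first_text second_text (combine_texts first_text second_text)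

-- ===== LEMMAS AND PROOFS =====

/-- The "mixed" line list after `i` steps: first `i` entries from `a`, the rest from `b`
(padded with `""`), truncated to `a`'s length. Both programs' `i`-th emitted string is
`join "\n" (pvMix a b i)`. -/
def pvMix (a b : List String) (i : Nat) : List String :=
  (List.range a.length).map
    (fun j => if j < i then a.getD j "" else if j < b.length then b.getD j "" else "")

theorem pvFoldl_append {α β : Type} (g : α → β) (l : List α) (init : List β) :
    l.foldl (fun acc x => acc ++ [g x]) init = init ++ l.map g := by
  induction l generalizing init with
  | nil => simp
  | cons x xs ih => simp [ih]

theorem pvMix_zero (a b : List String) :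
    pvMix a b 0 = (PySem.List.pyRange 0 (a.length : Int) 1).map
      (fun j => if j < (b.length : Int) then PySem.List.pyGetD b j "" else "") := by
  rw [PySem.List.pyRange_one, List.map_map]
  unfold pvMix
  have hlen : ((a.length : Int) - 0).toNat = a.length := by omega
  rw [hlen]
  refine List.map_congr_left (fun k hk => ?_)
  rw [List.mem_range] at hk
  simp only [Function.comp, zero_add, Nat.not_lt_zero, if_false]
  by_cases hb : k < b.length
  · rw [if_pos hb, if_pos (show ((k : Int) < (b.length : Int)) by exact_mod_cast hb),
      PySem.List.pyGetD_of_nonneg b "" (by positivity), Int.toNat_natCast]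
  · rw [if_neg hb, if_neg (show ¬ ((k : Int) < (b.length : Int)) by exact_mod_cast hb)]

theorem pvMix_succ (a b : List String) (k : Nat) :
    pvMix a b (k + 1) =
      if k < a.length then (pvMix a b k).set k (a.getD k "") else pvMix a b k := by
  unfold pvMix
  split_ifs with h
  · apply List.ext_getElem
    · simp
    · intro j hj _
      simp only [List.length_map, List.length_range] at hj
      rw [List.getElem_set]
      by_cases hjk : j = k
      · subst hjk
        simp [List.getElem_map, List.getElem_range]
      · simp only [List.getElem_map, List.getElem_range,
          show (j < k + 1 ↔ j < k) by omega]
        rw [if_neg (show ¬ k = j by omega)]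
  · refine List.map_congr_left (fun j hj => ?_)
    rw [List.mem_range] at hj
    simp only [show (j < k + 1 ↔ j < k) by omega]

/-- A's inner loop over `enumerate arr1` at outer index `i ≥ 0` builds `pvMix a b i.toNat`. -/
theorem pvInner_eq (a b : List String) (i : Int) (hi : 0 ≤ i) :
    (PySem.List.enumerate a).foldl (fun arr3 p =>
      if p.1 < i then
        arr3 ++ [if p.1 < (a.length : Int) then PySem.List.pyGetD a p.1 "" else ""]
      else
        arr3 ++ [if p.1 < (b.length : Int) then PySem.List.pyGetD b p.1 "" else ""]) [] =
    pvMix a b i.toNat := by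
  have h : ∀ (l : List (Int × String)) (acc : List String),
      l.foldl (fun arr3 p =>
        if p.1 < i then
          arr3 ++ [if p.1 < (a.length : Int) then PySem.List.pyGetD a p.1 "" else ""]
        else
          arr3 ++ [if p.1 < (b.length : Int) then PySem.List.pyGetD b p.1 "" else ""]) acc =
      acc ++ l.map (fun p => if p.1 < i then
          (if p.1 < (a.length : Int) then PySem.List.pyGetD a p.1 "" else "")
        else
          (if p.1 < (b.length : Int) then PySem.List.pyGetD b p.1 "" else "")) := by
    intro l
    induction l with
    | nil => simp
    | cons x xs ih =>
      intro acc
      simp only [List.foldl_cons, List.map_cons]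
      by_cases hx : x.1 < i
      · rw [if_pos hx, ih, if_pos hx]; simp
      · rw [if_neg hx, ih, if_neg hx]; simp
  rw [h, List.nil_append, PySem.List.enumerate_eq_map_pyRange a "", List.map_map,
    PySem.List.pyRange_one, List.map_map]
  have hlen : ((PySem.List.len a : Int) - 0).toNat = a.length := by
    simp [PySem.List.len]
  rw [hlen]
  unfold pvMix
  refine List.map_congr_left (fun k hk => ?_)
  rw [List.mem_range] at hk
  simp only [Function.comp, zero_add]
  by_cases hki : (k : Int) < i
  · rw [if_pos hki, if_pos (show k < i.toNat by omega),
      if_pos (show ((k : Int) < (a.length : Int)) by exact_mod_cast hk),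
      PySem.List.pyGetD_of_nonneg a "" (by positivity), Int.toNat_natCast]
  · rw [if_neg hki, if_neg (show ¬ k < i.toNat by omega)]
    by_cases hb : k < b.length
    · rw [if_pos (show ((k : Int) < (b.length : Int)) by exact_mod_cast hb), if_pos hb,
        PySem.List.pyGetD_of_nonneg b "" (by positivity), Int.toNat_natCast]
    · rw [if_neg (show ¬ ((k : Int) < (b.length : Int)) by exact_mod_cast hb), if_neg hb]

/-- B's loop invariant: after steps `1..m` the state is `pvMix a b m` together with the
outputs for `0..m`. -/
theorem pvB_loop (a b : List String) (m : Nat) :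
    (PySem.List.pyRange 1 ((m : Int) + 1) 1).foldl (fun st (i : Int) =>
      let cur' := if i - 1 < (a.length : Int)
        then st.1.set (i - 1).toNat (PySem.List.pyGetD a (i - 1) "")
        else st.1
      (cur', st.2 ++ [PySem.Str.join "\n" cur']))
      (pvMix a b 0, [PySem.Str.join "\n" (pvMix a b 0)]) =
    (pvMix a b m, (List.range (m + 1)).map (fun k => PySem.Str.join "\n" (pvMix a b k))) := by
  induction m with
  | zero =>
    rw [PySem.List.pyRange_one_eq_nil (by omega)]
    simp [List.range_succ]
  | succ m ih =>
    have hsplit : ((m + 1 : Nat) : Int) + 1 = ((m : Int) + 1) + 1 := by push_cast; ring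
    rw [hsplit, PySem.List.pyRange_one_succ_right (by omega), List.foldl_append, ih]
    simp only [List.foldl_cons, List.foldl_nil]
    have hcur : (if (m : Int) + 1 - 1 < (a.length : Int)
        then (pvMix a b m).set ((m : Int) + 1 - 1).toNat (PySem.List.pyGetD a ((m : Int) + 1 - 1) "")
        else pvMix a b m) = pvMix a b (m + 1) := by
      rw [show (m : Int) + 1 - 1 = (m : Int) by ring, pvMix_succ]
      by_cases h : m < a.length
      · rw [if_pos (show ((m : Int) < (a.length : Int)) by exact_mod_cast h), if_pos h,
          PySem.List.pyGetD_of_nonneg a "" (by positivity), Int.toNat_natCast]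
      · rw [if_neg (show ¬ ((m : Int) < (a.length : Int)) by exact_mod_cast h), if_neg h]
    simp only [hcur]
    rw [List.range_succ (n := m + 1), List.map_append, List.map_singleton]

-- ===== VERDICT (by name: the statement is the Claim_ definition above) =====
theorem combine_texts_spec : Claim_equal_combine_texts := by
  intro first_text second_text _
  unfold Spec_combine_texts combine_texts combine_texts_alt
  generalize (PySem.Str.split? first_text "\n").getD [] = a
  generalize (PySem.Str.split? second_text "\n").getD [] = b
  simp only []
  have hN : max (a.length : Int) (b.length : Int) = ((max a.length b.length : Nat) : Int) := by
    push_cast; rfl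
  rw [hN]
  set N : Nat := max a.length b.length with hNdef
  rw [pvFoldl_append, List.nil_append]
  have hA : ∀ i ∈ PySem.List.pyRange 0 ((N : Int) + 1) 1,
      PySem.Str.join "\n" ((PySem.List.enumerate a).foldl (fun arr3 p =>
        if p.1 < i then
          arr3 ++ [if p.1 < (a.length : Int) then PySem.List.pyGetD a p.1 "" else ""]
        else
          arr3 ++ [if p.1 < (b.length : Int) then PySem.List.pyGetD b p.1 "" else ""]) []) =
      PySem.Str.join "\n" (pvMix a b i.toNat) := by
    intro i hmem
    rw [PySem.List.mem_pyRange_one] at hmem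
    rw [pvInner_eq a b i hmem.1]
  rw [List.map_congr_left hA, ← pvMix_zero, pvB_loop]
  rw [PySem.List.pyRange_one]
  have hlen : (((N : Int) + 1) - 0).toNat = N + 1 := by omega
  rw [hlen, List.map_map]
  refine List.map_congr_left (fun k hk => ?_)
  simp only [Function.comp, zero_add, Int.toNat_natCast]
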